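-- pv_equiv track=rewrite | github.com/mikihaz/golf-AI-analytics | ppt_generator.py | _structure_content
-- ===== SOURCE A (Python) =====
-- def _structure_content(analysis):
--     """Better structure the content for presentation"""
--     sections = []
--     current_section = []
--
--     for line in analysis.split('\n'):
--         if line.strip():
--             if any(key in line.lower() for key in ['summary:', 'overview:', 'metrics:', 'conclusion:']):
--                 if current_section:
--                     sections.append('\n'.join(current_section))
--                 current_section = [line]
--             else:
--                 current_section.append(line)
--
--     if current_section:
--         sections.append('\n'.join(current_section))
--
--     return sections
-- ===== SOURCE B (Python) =====
-- def _structure_content(analysis):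
--     """Boundary-scan re-implementation: filter blank lines once, then carve the
--     line list into chunks, each chunk running from one header (or the start)
--     up to the next header."""
--     keys = ('summary:', 'overview:', 'metrics:', 'conclusion:')
--
--     def is_header(line):
--         low = line.lower()
--         return any(k in low for k in keys)
--
--     lines = [l for l in analysis.split('\n') if l.strip()]
--
--     def chunks(ls):
--         if not ls:
--             return []
--         j = 1
--         while j < len(ls) and not is_header(ls[j]):
--             j += 1
--         return ['\n'.join(ls[:j])] + chunks(ls[j:])
--
--     return chunks(lines)
-- ===== Notes on version B (the rewrite author's own statement) =====
-- stated objective: alternative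
-- what changed: Replaces the accumulate-and-flush state machine (sections + current_section mutated per line) with a single blank-line filter followed by recursive carving of the line list at header boundaries (scan to the next header, slice, recurse).
import Mathlib
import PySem

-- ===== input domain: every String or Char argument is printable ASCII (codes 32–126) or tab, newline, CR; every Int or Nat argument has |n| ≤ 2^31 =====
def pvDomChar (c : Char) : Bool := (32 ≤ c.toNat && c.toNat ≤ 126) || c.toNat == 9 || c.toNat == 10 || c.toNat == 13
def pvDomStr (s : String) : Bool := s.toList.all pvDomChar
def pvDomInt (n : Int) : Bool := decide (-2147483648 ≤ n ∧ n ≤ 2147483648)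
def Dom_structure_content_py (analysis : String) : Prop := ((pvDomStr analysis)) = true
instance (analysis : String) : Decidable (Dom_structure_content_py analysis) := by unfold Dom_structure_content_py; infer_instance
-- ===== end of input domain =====

-- B replaces A's accumulate-and-flush loop with a blank-line filter plus recursive carving at header boundaries (alternative decomposition, same cost).

-- ===== PORT A =====
-- A's per-line loop body: skip blank lines; a header line flushes current_section and starts a new one; other lines are appended.
def pvStepA (st : List String × List String) (line : String) : List String × List String :=
  if PySem.Str.strip line ≠ "" then
    if (["summary:", "overview:", "metrics:", "conclusion:"]).any
        (fun key => PySem.Str.isIn key (PySem.Str.lower line)) then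
      (if st.2 ≠ [] then st.1 ++ [PySem.Str.join "\n" st.2] else st.1, [line])
    else
      (st.1, st.2 ++ [line])
  else st

-- the separator '\n' is never empty, so split? is always `some`; getD [] is exact
def structure_content_py (analysis : String) : List String :=
  let st := (((PySem.Str.split? analysis "\n").getD [])).foldl pvStepA ([], [])
  if st.2 ≠ [] then st.1 ++ [PySem.Str.join "\n" st.2] else st.1

-- ===== PORT B =====
def pvIsHeaderB (line : String) : Bool :=
  (["summary:", "overview:", "metrics:", "conclusion:"]).any
    (fun key => PySem.Str.isIn key (PySem.Str.lower line))

-- Source B's chunks: the j-scan past non-header lines followed by the ls[:j] / ls[j:] slices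
-- is exactly takeWhile / dropWhile on the tail.
def pvChunksB : List String → List String
  | [] => []
  | l :: rest =>
      PySem.Str.join "\n" (l :: rest.takeWhile (fun s => !pvIsHeaderB s))
        :: pvChunksB (rest.dropWhile (fun s => !pvIsHeaderB s))
termination_by ls => ls.length
decreasing_by
  exact Nat.lt_succ_of_le (List.length_dropWhile_le _ _)

def structure_content_py_alt (analysis : String) : List String :=
  pvChunksB ((((PySem.Str.split? analysis "\n").getD [])).filter (fun l => PySem.Str.strip l ≠ ""))

-- ===== PRECONDITION & SPEC =====
def Spec_structure_content_py (analysis : String) (out : List String) : Prop := out = structure_content_py_alt analysis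
instance (analysis : String) (out : List String) : Decidable (Spec_structure_content_py analysis out) := by unfold Spec_structure_content_py; infer_instance

-- ===== CLAIM (what is proved, stated in full; the proofs are below) =====
def Claim_equal_structure_content_py : Prop := ∀ (analysis : String), Dom_structure_content_py analysis → Spec_structure_content_py analysis (structure_content_py analysis)

-- ===== LEMMAS AND PROOFS =====

-- A's step on a non-blank line (the outer strip-test removed)
def pvStepNB (st : List String × List String) (line : String) : List String × List String :=
  if pvIsHeaderB line then
    (if st.2 ≠ [] then st.1 ++ [PySem.Str.join "\n" st.2] else st.1, [line])
  else
    (st.1, st.2 ++ [line])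

-- flush the pending current_section at the end of A's loop
def pvFinish (st : List String × List String) : List String :=
  if st.2 ≠ [] then st.1 ++ [PySem.Str.join "\n" st.2] else st.1

-- A's state machine, run from a nonempty current section, as a direct recursion
def pvG (cur : List String) : List String → List String
  | [] => [PySem.Str.join "\n" cur]
  | x :: xs =>
      if pvIsHeaderB x then PySem.Str.join "\n" cur :: pvG [x] xs
      else pvG (cur ++ [x]) xs

theorem pvStepA_eq (st : List String × List String) (line : String) :
    pvStepA st line = if PySem.Str.strip line ≠ "" then pvStepNB st line else st := rfl

theorem pvFoldA_filter (ls : List String) (st : List String × List String) :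
    ls.foldl pvStepA st = (ls.filter (fun l => PySem.Str.strip l ≠ "")).foldl pvStepNB st := by
  induction ls generalizing st with
  | nil => rfl
  | cons l t ih =>
      simp only [List.foldl_cons, List.filter_cons, pvStepA_eq]
      by_cases h : PySem.Str.strip l ≠ "" <;> simp [h, ih]

theorem pvFoldNB_g (ls : List String) (secs cur : List String) (hcur : cur ≠ []) :
    pvFinish (ls.foldl pvStepNB (secs, cur)) = secs ++ pvG cur ls := by
  induction ls generalizing secs cur with
  | nil => simp [pvFinish, pvG, hcur]
  | cons x xs ih =>
      by_cases h : pvIsHeaderB x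
      · have : pvStepNB (secs, cur) x = (secs ++ [PySem.Str.join "\n" cur], [x]) := by
          simp [pvStepNB, h, hcur]
        simp only [List.foldl_cons, this, pvG, h]
        rw [ih _ _ (by simp)]
        simp
      · have : pvStepNB (secs, cur) x = (secs, cur ++ [x]) := by
          simp [pvStepNB, h]
        simp only [List.foldl_cons, this, pvG, if_neg h]
        rw [ih _ _ (by simp)]

theorem pvG_chunks (ls : List String) (cur : List String) (hcur : cur ≠ []) :
    pvG cur ls =
      PySem.Str.join "\n" (cur ++ ls.takeWhile (fun s => !pvIsHeaderB s))
        :: pvChunksB (ls.dropWhile (fun s => !pvIsHeaderB s)) := by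
  induction ls generalizing cur with
  | nil => simp [pvG, pvChunksB]
  | cons x xs ih =>
      by_cases h : pvIsHeaderB x
      · simp only [pvG, List.takeWhile_cons, List.dropWhile_cons, h,
          Bool.not_true, Bool.false_eq_true, reduceIte]
        rw [ih [x] (by simp)]
        simp [pvChunksB]
      · simp only [pvG, List.takeWhile_cons, List.dropWhile_cons, h,
          Bool.not_false, if_pos]
        rw [ih (cur ++ [x]) (by simp)]
        simp

theorem pvMain_eq (ls : List String) : pvFinish (ls.foldl pvStepNB ([], [])) = pvChunksB ls := by
  cases ls with
  | nil => simp [pvFinish, pvChunksB]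
  | cons l rest =>
      have h1 : pvStepNB ([], []) l = ([], [l]) := by
        by_cases h : pvIsHeaderB l <;> simp [pvStepNB, h]
      rw [List.foldl_cons, h1, pvFoldNB_g rest [] [l] (by simp),
        pvG_chunks rest [l] (by simp)]
      simp [pvChunksB]

-- ===== VERDICT (by name: the statement is the Claim_ definition above) =====
theorem structure_content_py_spec : Claim_equal_structure_content_py := by
  intro analysis _
  show pvFinish ((((PySem.Str.split? analysis "\n").getD []) ).foldl pvStepA ([], []))
      = structure_content_py_alt analysis
  rw [pvFoldA_filter]
  exact pvMain_eq _
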